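-- pv_equiv track=rewrite | github.com/marathan24/stackbench-v3-demo-testing | stackbench/evaluation/prompt_robustness.py | add_synonyms
-- ===== SOURCE A (Python) =====
-- def add_synonyms(prompt: str) -> str:
--     """
--     Add synonyms to make prompt more verbose.
--
--     Tests if extra wording affects evaluation.
--
--     Args:
--         prompt: Original prompt
--
--     Returns:
--         Prompt with synonyms added
--     """
--     # Add clarifying synonyms
--     replacements = {
--         "clarity": "clarity (i.e., how easy to understand)",
--         "completeness": "completeness (i.e., whether all info is provided)",
--         "documentation": "documentation (i.e., written guides and tutorials)",
--     }
--
--     verbose = prompt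
--     for term, expansion in replacements.items():
--         verbose = verbose.replace(term, expansion)
--
--     return verbose
-- ===== SOURCE B (Python) =====
-- def add_synonyms(prompt: str) -> str:
--     """Single left-to-right scan: at each position emit the expansion of the
--     first matching term (the terms never overlap), otherwise copy the char."""
--     out = []
--     i = 0
--     n = len(prompt)
--     while i < n:
--         if prompt.startswith("clarity", i):
--             out.append("clarity (i.e., how easy to understand)")
--             i += 7
--         elif prompt.startswith("completeness", i):
--             out.append("completeness (i.e., whether all info is provided)")
--             i += 12
--         elif prompt.startswith("documentation", i):
--             out.append("documentation (i.e., written guides and tutorials)")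
--             i += 13
--         else:
--             out.append(prompt[i])
--             i += 1
--     return "".join(out)
-- ===== Notes on version B (the rewrite author's own statement) =====
-- stated objective: alternative
-- what changed: B makes a single left-to-right scan of the prompt, expanding whichever term matches at each position via startswith, instead of A's three independent full-string replace passes; equivalence rests on the terms being mutually non-overlapping and the expansions not re-introducing later terms.
import Mathlib
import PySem

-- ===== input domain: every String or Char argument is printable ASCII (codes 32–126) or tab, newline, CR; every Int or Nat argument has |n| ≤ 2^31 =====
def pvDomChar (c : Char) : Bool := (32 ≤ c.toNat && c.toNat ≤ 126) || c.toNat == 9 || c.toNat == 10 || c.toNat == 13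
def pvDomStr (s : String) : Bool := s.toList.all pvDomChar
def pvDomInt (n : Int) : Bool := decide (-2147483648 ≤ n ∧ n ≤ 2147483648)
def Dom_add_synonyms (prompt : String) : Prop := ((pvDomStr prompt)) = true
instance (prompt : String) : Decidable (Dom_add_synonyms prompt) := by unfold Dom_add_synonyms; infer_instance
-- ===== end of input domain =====

-- B replaces A's three sequential full-string replace passes by a single left-to-right
-- first-match scan (alternative decomposition, same cost class; equivalence proved below).

-- ===== PORT A =====
-- the dict literal of term → expansion, as an association list in insertion order
def pvReplacements : List (String × String) :=
  [("clarity", "clarity (i.e., how easy to understand)"),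
   ("completeness", "completeness (i.e., whether all info is provided)"),
   ("documentation", "documentation (i.e., written guides and tutorials)")]

-- 'verbose = prompt; for term, expansion in replacements.items(): verbose = verbose.replace(term, expansion)'
def add_synonyms (prompt : String) : String :=
  pvReplacements.foldl (fun verbose te => PySem.Str.replace verbose te.1 te.2) prompt

-- ===== PORT B =====
-- B's while-loop over an index i, transcribed as structural recursion on the suffix:
-- at each position expand the first term that startswith-matches, else copy the char.
def pvScan : List Char → List Char
  | [] => []
  | c :: t =>
    if "clarity".toList.isPrefixOf (c :: t) then
      "clarity (i.e., how easy to understand)".toList ++ pvScan (List.drop 6 t)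
    else if "completeness".toList.isPrefixOf (c :: t) then
      "completeness (i.e., whether all info is provided)".toList ++ pvScan (List.drop 11 t)
    else if "documentation".toList.isPrefixOf (c :: t) then
      "documentation (i.e., written guides and tutorials)".toList ++ pvScan (List.drop 12 t)
    else c :: pvScan t
  termination_by l => l.length
  decreasing_by all_goals (simp [List.length_drop]; try omega)

def add_synonyms_alt (prompt : String) : String :=
  String.ofList (pvScan prompt.toList)

-- ===== PRECONDITION & SPEC =====
def Spec_add_synonyms (prompt : String) (out : String) : Prop := out = add_synonyms_alt prompt
instance (prompt : String) (out : String) : Decidable (Spec_add_synonyms prompt out) := by unfold Spec_add_synonyms; infer_instance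

-- ===== CLAIM (what is proved, stated in full; the proofs are below) =====
def Claim_equal_add_synonyms : Prop := ∀ (prompt : String), Dom_add_synonyms prompt → Spec_add_synonyms prompt (add_synonyms prompt)

-- ===== LEMMAS AND PROOFS =====

-- proof-side recursion equal to one pass of Python's str.replace (for nonempty old)
def pvRepl (old new : List Char) : List Char → List Char
  | [] => []
  | c :: t =>
    if old.isPrefixOf (c :: t) then new ++ pvRepl old new (List.drop (old.length - 1) t)
    else c :: pvRepl old new t
  termination_by l => l.length
  decreasing_by all_goals (simp [List.length_drop]; try omega)

theorem pvGo_eq_repl (old new : List Char) (hold : old ≠ []) :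
    ∀ (fuel : Nat) (l acc : List Char), l.length ≤ fuel →
      PySem.Chars.replace.go old new fuel l acc = acc.reverse ++ pvRepl old new l := by
  intro fuel
  induction fuel with
  | zero =>
    intro l acc hl
    have : l = [] := List.eq_nil_of_length_eq_zero (Nat.le_zero.mp hl)
    subst this
    simp [PySem.Chars.replace.go, pvRepl]
  | succ n ih =>
    intro l acc hl
    match l with
    | [] => simp [PySem.Chars.replace.go, pvRepl]
    | c :: t =>
      rw [PySem.Chars.replace.go]
      by_cases h : old.isPrefixOf (c :: t)
      · rw [if_pos h]
        obtain ⟨o, os, rfl⟩ : ∃ o os, old = o :: os := by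
          cases old with | nil => exact absurd rfl hold | cons o os => exact ⟨o, os, rfl⟩
        have hdrop : List.drop (o :: os).length (c :: t) = List.drop ((o :: os).length - 1) t := by
          simp
        rw [hdrop, ih _ _ (by simp at hl ⊢; omega), pvRepl, if_pos h]
        simp
      · rw [if_neg h, ih _ _ (by simp at hl ⊢; omega), pvRepl, if_neg h]
        simp

theorem pvReplace_eq_repl (s old new : List Char) (hold : old ≠ []) :
    PySem.Chars.replace s old new = pvRepl old new s := by
  rw [PySem.Chars.replace, if_neg (by simpa [List.isEmpty_iff] using hold)]
  simpa using pvGo_eq_repl old new hold s.length s [] le_rfl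

-- a head occurrence of old is replaced
theorem pvRepl_head (old new t : List Char) (hold : old ≠ []) :
    pvRepl old new (old ++ t) = new ++ pvRepl old new t := by
  obtain ⟨o, os, rfl⟩ : ∃ o os, old = o :: os := by
    cases old with | nil => exact absurd rfl hold | cons o os => exact ⟨o, os, rfl⟩
  rw [show (o :: os) ++ t = o :: (os ++ t) by simp, pvRepl]
  rw [if_pos (List.isPrefixOf_iff_prefix.mpr (by exact List.prefix_append _ _))]
  have : List.drop ((o :: os).length - 1) (os ++ t) = t := by
    simp [List.drop_left (l₁ := os) (l₂ := t)]
  rw [this]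

-- passthrough: a block a in which no occurrence of old can start is copied verbatim
theorem pvRepl_passthrough (old new : List Char)
    (a : List Char)
    (H : ∀ i, i < a.length → ¬ old.isPrefixOf (a.drop i) ∧ ¬ (a.drop i).isPrefixOf old) :
    ∀ x, pvRepl old new (a ++ x) = a ++ pvRepl old new x := by
  induction a with
  | nil => intro x; simp
  | cons c a' ih =>
    intro x
    have H0 := H 0 (by simp)
    simp only [List.drop_zero] at H0
    have hnp : ¬ old.isPrefixOf (c :: (a' ++ x)) := by
      intro hpre
      have h1 : old <+: (c :: a') ++ x := by
        rw [List.cons_append]; exact List.isPrefixOf_iff_prefix.mp hpre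
      have h2 : (c :: a') <+: (c :: a') ++ x := List.prefix_append _ _
      rcases List.prefix_or_prefix_of_prefix h1 h2 with h | h
      · exact H0.1 (List.isPrefixOf_iff_prefix.mpr h)
      · exact H0.2 (List.isPrefixOf_iff_prefix.mpr h)
    rw [show (c :: a') ++ x = c :: (a' ++ x) by simp, pvRepl, if_neg hnp]
    rw [ih (fun i hi => by simpa using H (i + 1) (by simpa using Nat.succ_lt_succ hi))]
    simp

-- a prefix that cannot align with the replacement text survives pvRepl backwards
theorem pvRepl_prefix_back (old new : List Char) (hold : old ≠ []) (t p : List Char)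
    (Hq : ∀ i, i < p.length → ¬ (p.drop i).isPrefixOf new ∧ ¬ new.isPrefixOf (p.drop i))
    (hpre : p.isPrefixOf (pvRepl old new t)) : p.isPrefixOf t := by
  match p, t with
  | [], _ => simp
  | q :: p', [] => simp [pvRepl] at hpre
  | q :: p', c :: t' =>
    have H0 := Hq 0 (by simp)
    simp only [List.drop_zero] at H0
    by_cases h : old.isPrefixOf (c :: t')
    · exfalso
      rw [pvRepl, if_pos h] at hpre
      have h1 : (q :: p') <+: new ++ pvRepl old new (List.drop (old.length - 1) t') :=
        List.isPrefixOf_iff_prefix.mp hpre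
      have h2 : new <+: new ++ pvRepl old new (List.drop (old.length - 1) t') :=
        List.prefix_append _ _
      rcases List.prefix_or_prefix_of_prefix h1 h2 with hh | hh
      · exact H0.1 (List.isPrefixOf_iff_prefix.mpr hh)
      · exact H0.2 (List.isPrefixOf_iff_prefix.mpr hh)
    · rw [pvRepl, if_neg h] at hpre
      have hp := List.isPrefixOf_iff_prefix.mp hpre
      obtain ⟨hq, hp'⟩ := List.cons_prefix_cons.mp hp
      subst hq
      have hrec := pvRepl_prefix_back old new hold t' p'
        (fun i hi => by simpa using Hq (i + 1) (by simpa using Nat.succ_lt_succ hi))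
        (List.isPrefixOf_iff_prefix.mpr hp')
      exact List.isPrefixOf_iff_prefix.mpr
        (List.cons_prefix_cons.mpr ⟨rfl, List.isPrefixOf_iff_prefix.mp hrec⟩)
  termination_by t.length

-- abbreviations for the three terms and expansions (proof-side only)
def pvK1 : List Char := "clarity".toList
def pvE1 : List Char := "clarity (i.e., how easy to understand)".toList
def pvK2 : List Char := "completeness".toList
def pvE2 : List Char := "completeness (i.e., whether all info is provided)".toList
def pvK3 : List Char := "documentation".toList
def pvE3 : List Char := "documentation (i.e., written guides and tutorials)".toList

-- unfolding pvScan at a matched term (first match wins)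
theorem pvScan_head1 (t0 : List Char) : pvScan (pvK1 ++ t0) = pvE1 ++ pvScan t0 := by
  rw [show pvK1 ++ t0 = 'c' :: ("larity".toList ++ t0) from rfl]
  simp only [pvScan]
  have hc : "clarity".toList.isPrefixOf ('c' :: ("larity".toList ++ t0)) = true :=
    List.isPrefixOf_iff_prefix.mpr ⟨t0, rfl⟩
  rw [if_pos hc]
  have hd : List.drop 6 ("larity".toList ++ t0) = t0 := by
    exact List.drop_left (l₁ := "larity".toList) (l₂ := t0)
  rw [hd]
  rfl

theorem pvScan_head2 (t0 : List Char)
    (hno1 : ¬ pvK1.isPrefixOf (pvK2 ++ t0) = true) :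
    pvScan (pvK2 ++ t0) = pvE2 ++ pvScan t0 := by
  have heq : pvK2 ++ t0 = 'c' :: ("ompleteness".toList ++ t0) := rfl
  rw [heq]
  simp only [pvScan]
  rw [if_neg (heq ▸ hno1)]
  have hc : "completeness".toList.isPrefixOf ('c' :: ("ompleteness".toList ++ t0)) = true :=
    List.isPrefixOf_iff_prefix.mpr ⟨t0, rfl⟩
  rw [if_pos hc]
  have hd : List.drop 11 ("ompleteness".toList ++ t0) = t0 := by
    exact List.drop_left (l₁ := "ompleteness".toList) (l₂ := t0)
  rw [hd]
  rfl

theorem pvScan_head3 (t0 : List Char)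
    (hno1 : ¬ pvK1.isPrefixOf (pvK3 ++ t0) = true)
    (hno2 : ¬ pvK2.isPrefixOf (pvK3 ++ t0) = true) :
    pvScan (pvK3 ++ t0) = pvE3 ++ pvScan t0 := by
  have heq : pvK3 ++ t0 = 'd' :: ("ocumentation".toList ++ t0) := rfl
  rw [heq]
  simp only [pvScan]
  rw [if_neg (heq ▸ hno1), if_neg (heq ▸ hno2)]
  have hc : "documentation".toList.isPrefixOf ('d' :: ("ocumentation".toList ++ t0)) = true :=
    List.isPrefixOf_iff_prefix.mpr ⟨t0, rfl⟩
  rw [if_pos hc]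
  have hd : List.drop 12 ("ocumentation".toList ++ t0) = t0 := by
    exact List.drop_left (l₁ := "ocumentation".toList) (l₂ := t0)
  rw [hd]
  rfl

-- the main equivalence on the list side
theorem pvMain (l : List Char) :
    pvRepl pvK3 pvE3 (pvRepl pvK2 pvE2 (pvRepl pvK1 pvE1 l)) = pvScan l := by
  match l with
  | [] => simp [pvRepl, pvScan]
  | c :: t =>
    by_cases h1 : pvK1.isPrefixOf (c :: t)
    · obtain ⟨t0, ht0⟩ := List.isPrefixOf_iff_prefix.mp h1
      rw [← ht0]
      rw [pvRepl_head pvK1 pvE1 t0 (by decide)]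
      rw [pvRepl_passthrough pvK2 pvE2 pvE1 (by decide)]
      rw [pvRepl_passthrough pvK3 pvE3 pvE1 (by decide)]
      rw [pvMain t0]
      rw [pvScan_head1 t0]
    · by_cases h2 : pvK2.isPrefixOf (c :: t)
      · obtain ⟨t0, ht0⟩ := List.isPrefixOf_iff_prefix.mp h2
        rw [← ht0]
        rw [pvRepl_passthrough pvK1 pvE1 pvK2 (by decide)]
        rw [pvRepl_head pvK2 pvE2 _ (by decide)]
        rw [pvRepl_passthrough pvK3 pvE3 pvE2 (by decide)]
        rw [pvMain t0]
        rw [pvScan_head2 t0 (ht0 ▸ h1)]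
      · by_cases h3 : pvK3.isPrefixOf (c :: t)
        · obtain ⟨t0, ht0⟩ := List.isPrefixOf_iff_prefix.mp h3
          rw [← ht0]
          rw [pvRepl_passthrough pvK1 pvE1 pvK3 (by decide)]
          rw [pvRepl_passthrough pvK2 pvE2 pvK3 (by decide)]
          rw [pvRepl_head pvK3 pvE3 _ (by decide)]
          rw [pvMain t0]
          rw [pvScan_head3 t0 (ht0 ▸ h1) (ht0 ▸ h2)]
        · -- no term matches at this position
          have hneg2 : ¬ pvK2.isPrefixOf (c :: pvRepl pvK1 pvE1 t) = true := by
            intro hpre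
            have hsplit := List.isPrefixOf_iff_prefix.mp hpre
            rw [show pvK2 = 'c' :: "ompleteness".toList from rfl] at hsplit
            obtain ⟨hc, hrest⟩ := List.cons_prefix_cons.mp hsplit
            have hback := pvRepl_prefix_back pvK1 pvE1 (by decide) t "ompleteness".toList
              (by decide) (List.isPrefixOf_iff_prefix.mpr hrest)
            apply h2
            rw [show pvK2 = 'c' :: "ompleteness".toList from rfl]
            exact List.isPrefixOf_iff_prefix.mpr
              (List.cons_prefix_cons.mpr ⟨hc, List.isPrefixOf_iff_prefix.mp hback⟩)
          have hneg3 : ¬ pvK3.isPrefixOf (c :: pvRepl pvK2 pvE2 (pvRepl pvK1 pvE1 t)) = true := by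
            intro hpre
            have hsplit := List.isPrefixOf_iff_prefix.mp hpre
            rw [show pvK3 = 'd' :: "ocumentation".toList from rfl] at hsplit
            obtain ⟨hc, hrest⟩ := List.cons_prefix_cons.mp hsplit
            have hb2 := pvRepl_prefix_back pvK2 pvE2 (by decide) (pvRepl pvK1 pvE1 t)
              "ocumentation".toList (by decide) (List.isPrefixOf_iff_prefix.mpr hrest)
            have hb1 := pvRepl_prefix_back pvK1 pvE1 (by decide) t
              "ocumentation".toList (by decide) hb2
            apply h3
            rw [show pvK3 = 'd' :: "ocumentation".toList from rfl]
            exact List.isPrefixOf_iff_prefix.mpr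
              (List.cons_prefix_cons.mpr ⟨hc, List.isPrefixOf_iff_prefix.mp hb1⟩)
          have s1 : pvRepl pvK1 pvE1 (c :: t) = c :: pvRepl pvK1 pvE1 t := by
            rw [pvRepl, if_neg h1]
          have s2 : pvRepl pvK2 pvE2 (c :: pvRepl pvK1 pvE1 t)
              = c :: pvRepl pvK2 pvE2 (pvRepl pvK1 pvE1 t) := by
            rw [pvRepl, if_neg hneg2]
          have s3 : pvRepl pvK3 pvE3 (c :: pvRepl pvK2 pvE2 (pvRepl pvK1 pvE1 t))
              = c :: pvRepl pvK3 pvE3 (pvRepl pvK2 pvE2 (pvRepl pvK1 pvE1 t)) := by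
            rw [pvRepl, if_neg hneg3]
          rw [s1, s2, s3, pvMain t]
          have hscan : pvScan (c :: t) = c :: pvScan t := by
            simp only [pvScan]
            rw [if_neg (show ¬ "clarity".toList.isPrefixOf (c :: t) = true from h1),
                if_neg (show ¬ "completeness".toList.isPrefixOf (c :: t) = true from h2),
                if_neg (show ¬ "documentation".toList.isPrefixOf (c :: t) = true from h3)]
          rw [hscan]
  termination_by l.length
  decreasing_by all_goals (first
    | (rw [← ht0]; simp [pvK1, pvK2, pvK3]; omega)
    | simp)

-- ===== VERDICT (by name: the statement is the Claim_ definition above) =====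
theorem add_synonyms_spec : Claim_equal_add_synonyms := by
  intro prompt _
  unfold Spec_add_synonyms add_synonyms add_synonyms_alt pvReplacements
  simp only [List.foldl]
  simp only [show ∀ s o n : String, PySem.Str.replace s o n
      = String.ofList (PySem.Chars.replace s.toList o.toList n.toList) from fun _ _ _ => rfl]
  simp only [String.toList_ofList]
  apply congrArg
  rw [pvReplace_eq_repl prompt.toList "clarity".toList
      "clarity (i.e., how easy to understand)".toList (by decide)]
  rw [pvReplace_eq_repl _ "completeness".toList
      "completeness (i.e., whether all info is provided)".toList (by decide)]
  rw [pvReplace_eq_repl _ "documentation".toList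
      "documentation (i.e., written guides and tutorials)".toList (by decide)]
  exact pvMain prompt.toList
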